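-- pv_equiv track=rewrite | github.com/LiUshin/JellyfishBot | app/services/backup.py | _module_for_path
-- ===== SOURCE A (Python) =====
-- from typing import Dict, Iterable, List, Optional, Tuple
--
-- MODULE_PATHS: Dict[str, List[str]] = {
--     "filesystem":    ["filesystem"],
--     "conversations": ["conversations"],
--     "services":      ["services"],
--     "tasks":         ["tasks"],
--     "settings": [
--         "preferences.json",
--         "subagents.json",
--         "capability_prompts.json",
--         "system_prompt.json",
--         "system_prompt_versions",
--         "user_profile.json",
--         "user_profile_versions",
--         "soul",
--     ],
--     # api_keys handled specially — see _export_api_keys / _import_api_keys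
--     "api_keys": ["api_keys.json"],
-- }
--
-- def _module_for_path(rel_path: str) -> Optional[str]:
--     """Reverse-lookup which module a relative path belongs to."""
--     parts = rel_path.replace("\\", "/").split("/")
--     head = parts[0]
--     for mod, paths in MODULE_PATHS.items():
--         for p in paths:
--             if head == p or head == p.split("/")[0]:
--                 return mod
--     return None
-- ===== SOURCE B (Python) =====
-- from typing import Optional
--
-- # Tokens owned by the "settings" module (the only multi-token module);
-- # the four directory modules are self-named, and api_keys owns api_keys.json.
-- _SETTINGS_TOKENS = frozenset({
--     "preferences.json",
--     "subagents.json",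
--     "capability_prompts.json",
--     "system_prompt.json",
--     "system_prompt_versions",
--     "user_profile.json",
--     "user_profile_versions",
--     "soul",
-- })
--
--
-- def _module_for_path(rel_path: str) -> Optional[str]:
--     """Reverse-lookup which module a relative path belongs to.
--
--     Classifies the head segment directly instead of scanning MODULE_PATHS:
--     the four directory modules are named after their single path token, so the
--     head itself is the answer there; otherwise it is a settings token or the
--     api_keys file.
--     """
--     head = rel_path.replace("\\", "/").split("/")[0]
--     if head in ("filesystem", "conversations", "services", "tasks"):
--         return head
--     if head in _SETTINGS_TOKENS:
--         return "settings"
--     if head == "api_keys.json":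
--         return "api_keys"
--     return None
-- ===== Notes on version B (the rewrite author's own statement) =====
-- stated objective: simpler
-- what changed: Replaces A's nested scan over MODULE_PATHS by direct classification of the head segment: the four self-named directory modules return the head itself, settings tokens are one set-membership test, and api_keys.json is a single comparison; no iteration over the table and no per-token split.
import Mathlib
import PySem

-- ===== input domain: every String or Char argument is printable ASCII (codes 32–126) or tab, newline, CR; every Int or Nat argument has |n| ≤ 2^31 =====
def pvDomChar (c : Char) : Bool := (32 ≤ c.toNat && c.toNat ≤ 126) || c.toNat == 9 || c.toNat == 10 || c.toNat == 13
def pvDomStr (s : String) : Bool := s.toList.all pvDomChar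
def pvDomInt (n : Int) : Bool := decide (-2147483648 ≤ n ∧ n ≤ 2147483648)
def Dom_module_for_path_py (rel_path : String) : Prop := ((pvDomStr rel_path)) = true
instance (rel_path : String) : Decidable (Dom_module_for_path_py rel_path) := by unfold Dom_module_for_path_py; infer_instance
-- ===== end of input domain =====

-- B classifies the head segment directly (self-named modules return the head itself) instead of scanning MODULE_PATHS: simpler, no iteration over the table.

-- ===== PORT A =====
-- MODULE_PATHS, the module-level constant A scans (dict as insertion-ordered association list)
def modulePaths : List (String × List String) :=
  [ ("filesystem",    ["filesystem"]),
    ("conversations", ["conversations"]),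
    ("services",      ["services"]),
    ("tasks",         ["tasks"]),
    ("settings",      [ "preferences.json", "subagents.json", "capability_prompts.json",
                        "system_prompt.json", "system_prompt_versions", "user_profile.json",
                        "user_profile_versions", "soul" ]),
    ("api_keys",      ["api_keys.json"]) ]

-- s.split("/")[0]: split? with nonempty separator never returns none and the list is
-- nonempty, so getD []/headD "" are exact here (no IndexError possible)
def splitHead (s : String) : String :=
  ((PySem.Str.split? s "/").getD []).headD ""

-- inner 'for p in paths' loop: return mod on the first matching token
def scanPaths (head : String) (mod : String) : List String → Option String
  | [] => none
  | p :: rest =>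
    if head = p ∨ head = splitHead p then some mod
    else scanPaths head mod rest

-- outer 'for mod, paths in MODULE_PATHS.items()' loop
def scanMods (head : String) : List (String × List String) → Option String
  | [] => none
  | (mod, paths) :: rest =>
    match scanPaths head mod paths with
    | some m => some m
    | none => scanMods head rest

def module_for_path_py (rel_path : String) : Option String :=
  let head := splitHead (PySem.Str.replace rel_path "\\" "/")
  scanMods head modulePaths

-- ===== PORT B =====
-- tokens of the "settings" module (Python frozenset → PySem.Set)
def settingsTokens : PySem.Set String :=
  PySem.Set.ofList
    [ "preferences.json", "subagents.json", "capability_prompts.json",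
      "system_prompt.json", "system_prompt_versions", "user_profile.json",
      "user_profile_versions", "soul" ]

-- B's classifier of the head segment
def classifyHead (head : String) : Option String :=
  if head = "filesystem" ∨ head = "conversations" ∨ head = "services" ∨ head = "tasks" then
    some head
  else if settingsTokens.contains head then
    some "settings"
  else if head = "api_keys.json" then
    some "api_keys"
  else
    none

def module_for_path_py_alt (rel_path : String) : Option String :=
  classifyHead (splitHead (PySem.Str.replace rel_path "\\" "/"))

-- ===== PRECONDITION & SPEC =====
def Spec_module_for_path_py (rel_path : String) (out : Option String) : Prop := out = module_for_path_py_alt rel_path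
instance (rel_path : String) (out : Option String) : Decidable (Spec_module_for_path_py rel_path out) := by unfold Spec_module_for_path_py; infer_instance

-- ===== CLAIM (what is proved, stated in full; the proofs are below) =====
def Claim_equal_module_for_path_py : Prop := ∀ (rel_path : String), Dom_module_for_path_py rel_path → Spec_module_for_path_py rel_path (module_for_path_py rel_path)

-- ===== LEMMAS AND PROOFS =====

-- each path token contains no '/', so A's 'head == p.split("/")[0]' comparison is against p itself
theorem sh1 : splitHead "filesystem" = "filesystem" := by decide
theorem sh2 : splitHead "conversations" = "conversations" := by decide
theorem sh3 : splitHead "services" = "services" := by decide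
theorem sh4 : splitHead "tasks" = "tasks" := by decide
theorem sh5 : splitHead "preferences.json" = "preferences.json" := by decide
theorem sh6 : splitHead "subagents.json" = "subagents.json" := by decide
theorem sh7 : splitHead "capability_prompts.json" = "capability_prompts.json" := by decide
theorem sh8 : splitHead "system_prompt.json" = "system_prompt.json" := by decide
theorem sh9 : splitHead "system_prompt_versions" = "system_prompt_versions" := by decide
theorem sh10 : splitHead "user_profile.json" = "user_profile.json" := by decide
theorem sh11 : splitHead "user_profile_versions" = "user_profile_versions" := by decide
theorem sh12 : splitHead "soul" = "soul" := by decide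
theorem sh13 : splitHead "api_keys.json" = "api_keys.json" := by decide

-- both ports compute the same pure function of the head segment over fixed data:
-- a case analysis on the 13 distinct path tokens
theorem scan_eq_classify (head : String) :
    scanMods head modulePaths = classifyHead head := by
  by_cases h1 : head = "filesystem";  · subst h1; decide
  by_cases h2 : head = "conversations";  · subst h2; decide
  by_cases h3 : head = "services";  · subst h3; decide
  by_cases h4 : head = "tasks";  · subst h4; decide
  by_cases h5 : head = "preferences.json";  · subst h5; decide
  by_cases h6 : head = "subagents.json";  · subst h6; decide
  by_cases h7 : head = "capability_prompts.json";  · subst h7; decide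
  by_cases h8 : head = "system_prompt.json";  · subst h8; decide
  by_cases h9 : head = "system_prompt_versions";  · subst h9; decide
  by_cases h10 : head = "user_profile.json";  · subst h10; decide
  by_cases h11 : head = "user_profile_versions";  · subst h11; decide
  by_cases h12 : head = "soul";  · subst h12; decide
  by_cases h13 : head = "api_keys.json";  · subst h13; decide
  simp [scanMods, scanPaths, modulePaths, classifyHead, settingsTokens,
        PySem.Set.ofList, PySem.Set.contains,
        sh1, sh2, sh3, sh4, sh5, sh6, sh7, sh8, sh9, sh10, sh11, sh12, sh13,
        h1, h2, h3, h4, h5, h6, h7, h8, h9, h10, h11, h12, h13]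

-- ===== VERDICT (by name: the statement is the Claim_ definition above) =====
theorem module_for_path_py_spec : Claim_equal_module_for_path_py := by
  intro rel_path _
  unfold Spec_module_for_path_py module_for_path_py module_for_path_py_alt
  exact scan_eq_classify _
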